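-- pv_equiv track=rewrite | github.com/qkzk/calendar_python | src/explore_md_file.py | split_day_events
-- ===== SOURCE A (Python) =====
-- MD_LI_TOKENS = ("-", "*", "+")
--
-- def split_day_events(lines: list[str]) -> list[list[str]]:
--     """
--     Split the list of lines per day into lines per event per day.
--     @param lines: (list[str]) lines for a day
--     @return: (list[list[str]]) list of string lines per event
--     """
--     pack = [[]]
--     index = 0
--     while index < len(lines):
--         line = lines[index]
--         if line.startswith(MD_LI_TOKENS):
--             pack.append([line[2:]])
--         elif not line.startswith("\n"):
--             pack[-1].append(line)
--         index += 1
--     return pack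
-- ===== SOURCE B (Python) =====
-- MD_LI_TOKENS = ("-", "*", "+")
--
--
-- def _span_no_token(ls):
--     """Split ls into (prefix without token lines, rest starting at the first token line)."""
--     for i, l in enumerate(ls):
--         if l.startswith(MD_LI_TOKENS):
--             return ls[:i], ls[i:]
--     return ls, []
--
--
-- def _keep(ls):
--     return [l for l in ls if not l.startswith("\n")]
--
--
-- def split_day_events(lines: list[str]) -> list[list[str]]:
--     pre, rest = _span_no_token(lines)
--     out = [_keep(pre)]
--     while rest:
--         head, tail = rest[0], rest[1:]
--         body, rest = _span_no_token(tail)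
--         out.append([head[2:]] + _keep(body))
--     return out
-- ===== Notes on version B (the rewrite author's own statement) =====
-- stated objective: alternative
-- what changed: Replaces A's single mutable-last-group scan with a span-based chunking: split the lines at token boundaries, filter blanks per chunk, and emit [preamble]+one group per token chunk.
import Mathlib
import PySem

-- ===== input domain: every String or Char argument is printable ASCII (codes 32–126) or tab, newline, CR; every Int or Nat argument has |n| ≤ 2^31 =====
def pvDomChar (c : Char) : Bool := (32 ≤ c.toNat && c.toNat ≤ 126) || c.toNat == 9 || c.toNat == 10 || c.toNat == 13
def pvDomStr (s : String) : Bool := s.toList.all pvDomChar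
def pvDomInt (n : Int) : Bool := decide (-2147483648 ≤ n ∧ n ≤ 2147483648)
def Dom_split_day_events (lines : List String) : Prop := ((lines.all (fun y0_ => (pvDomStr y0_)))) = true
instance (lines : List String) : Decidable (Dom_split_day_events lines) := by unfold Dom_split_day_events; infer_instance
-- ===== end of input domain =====

-- B restructures A's single mutable-last-group scan into span-based chunking at token boundaries; objective: alternative decomposition (same cost).

-- ===== PORT A =====
-- line.startswith(MD_LI_TOKENS)
def pvTokA (line : String) : Bool :=
  PySem.Str.startswith line "-" || PySem.Str.startswith line "*" || PySem.Str.startswith line "+"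

-- one iteration of A's while loop over `pack`
def pvStepA (pack : List (List String)) (line : String) : List (List String) :=
  if pvTokA line then
    pack ++ [[PySem.Str.slice line (some 2) none]]
  else if !(PySem.Str.startswith line "\n") then
    pack.dropLast ++ [pack.getLastD [] ++ [line]]
  else
    pack

def split_day_events (lines : List String) : List (List String) :=
  lines.foldl pvStepA [[]]

-- ===== PORT B =====
def pvTokB (line : String) : Bool :=
  PySem.Str.startswith line "-" || PySem.Str.startswith line "*" || PySem.Str.startswith line "+"

-- _span_no_token: prefix without token lines / rest from the first token line
def pvNoTok (line : String) : Bool := !(pvTokB line)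

-- _keep
def pvKeep (ls : List String) : List String :=
  ls.filter (fun l => !(PySem.Str.startswith l "\n"))

-- the while loop of B: one group per token-headed chunk
def pvChunksB : List String → List (List String)
  | [] => []
  | head :: tail =>
      (PySem.Str.slice head (some 2) none :: pvKeep (tail.takeWhile pvNoTok))
        :: pvChunksB (tail.dropWhile pvNoTok)
  termination_by ls => ls.length
  decreasing_by
    simp only [List.length_cons]
    exact Nat.lt_succ_of_le (List.length_dropWhile_le _ _)

def split_day_events_alt (lines : List String) : List (List String) :=
  pvKeep (lines.takeWhile pvNoTok) :: pvChunksB (lines.dropWhile pvNoTok)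

-- ===== PRECONDITION & SPEC =====
def Spec_split_day_events (lines : List String) (out : List (List String)) : Prop := out = split_day_events_alt lines
instance (lines : List String) (out : List (List String)) : Decidable (Spec_split_day_events lines out) := by unfold Spec_split_day_events; infer_instance

-- ===== CLAIM (what is proved, stated in full; the proofs are below) =====
def Claim_equal_split_day_events : Prop := ∀ (lines : List String), Dom_split_day_events lines → Spec_split_day_events lines (split_day_events lines)

-- ===== LEMMAS AND PROOFS =====
-- loop invariant: folding A's step from any pack = P ++ [g] appends the current
-- chunk's kept lines to g and then produces exactly B's remaining chunks
lemma pvFoldA_split (ls : List String) : ∀ (P : List (List String)) (g : List String),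
    ls.foldl pvStepA (P ++ [g])
      = P ++ ((g ++ pvKeep (ls.takeWhile pvNoTok)) :: pvChunksB (ls.dropWhile pvNoTok)) := by
  induction ls with
  | nil => intro P g; simp [pvKeep, pvChunksB]
  | cons l ls ih =>
    intro P g
    by_cases ht : pvTokA l
    · have hnt : pvNoTok l = false := by
        simp only [pvNoTok, Bool.not_eq_false']; exact (ht : pvTokB l = true)
      have hstep : pvStepA (P ++ [g]) l = (P ++ [g]) ++ [[PySem.Str.slice l (some 2) none]] := by
        simp [pvStepA, ht]
      rw [List.foldl_cons, hstep, ih (P ++ [g]) [PySem.Str.slice l (some 2) none]]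
      simp [hnt, pvChunksB, pvKeep]
    · have ht' : pvTokA l = false := by simpa using ht
      have hnt : pvNoTok l = true := by
        simp only [pvNoTok, Bool.not_eq_true']; exact (ht' : pvTokB l = false)
      by_cases hb : PySem.Str.startswith l "\n"
      · have hbc : PySem.Chars.startswith l.toList ['\n'] = true := by
          simpa [PySem.Str.startswith] using hb
        have hstep : pvStepA (P ++ [g]) l = P ++ [g] := by simp [pvStepA, ht', hbc]
        rw [List.foldl_cons, hstep, ih P g]
        simp [hnt, pvKeep, hbc]
      · have hbc : PySem.Chars.startswith l.toList ['\n'] = false := by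
          simpa [PySem.Str.startswith] using hb
        have hstep : pvStepA (P ++ [g]) l = P ++ [g ++ [l]] := by simp [pvStepA, ht', hbc]
        rw [List.foldl_cons, hstep, ih P (g ++ [l])]
        simp [hnt, pvKeep, hbc]

-- ===== VERDICT (by name: the statement is the Claim_ definition above) =====
theorem split_day_events_spec : Claim_equal_split_day_events := by
  intro lines _
  unfold Spec_split_day_events split_day_events split_day_events_alt
  have := pvFoldA_split lines [] []
  simpa using this
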